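-- pv_equiv track=rewrite | github.com/Velcatt/September-Wading-Pool | day08/hangman/main.py | replace_in_current
-- ===== SOURCE A (Python) =====
-- def replace_in_current(
--     current,
--     li,
--     letter,
-- ):
--     newcurrent = ""
--     for i in range(len(current)):
--         if i in li:
--             newcurrent += letter
--         else:
--             newcurrent += current[i]
--     return newcurrent
-- ===== SOURCE B (Python) =====
-- def replace_in_current(
--     current,
--     li,
--     letter,
-- ):
--     chars = list(current)
--     for idx in li:
--         if 0 <= idx < len(current):
--             chars[idx] = letter
--     return ''.join(chars)
-- ===== Notes on version B (the rewrite author's own statement) =====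
-- stated objective: faster
-- what changed: B writes letter into a list of the string's characters at each valid index of li and joins, replacing A's per-character scan that tests membership in li.
import Mathlib
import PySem

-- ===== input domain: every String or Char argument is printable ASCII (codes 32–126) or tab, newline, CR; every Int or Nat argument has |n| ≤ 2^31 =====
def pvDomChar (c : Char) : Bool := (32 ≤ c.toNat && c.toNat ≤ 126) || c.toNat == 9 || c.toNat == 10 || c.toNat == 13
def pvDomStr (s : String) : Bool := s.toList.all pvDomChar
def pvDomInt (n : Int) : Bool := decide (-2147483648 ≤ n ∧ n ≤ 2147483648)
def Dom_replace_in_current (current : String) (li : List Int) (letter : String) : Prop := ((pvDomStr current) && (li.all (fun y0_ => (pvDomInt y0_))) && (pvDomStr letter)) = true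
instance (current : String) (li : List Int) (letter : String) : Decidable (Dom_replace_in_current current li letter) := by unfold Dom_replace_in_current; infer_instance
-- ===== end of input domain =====

-- B replaces characters by writing `letter` at each in-range index of `li` into a mutable
-- list of cells and joining, instead of A's scan of every position testing membership in `li`.


-- ===== PORT A =====
-- for i in range(len(current)): append `letter` if i in li else current[i]
def replace_in_current (current : String) (li : List Int) (letter : String) : String :=
  let cs := current.toList
  String.ofList ((List.range cs.length).foldl
    (fun acc (i : Nat) => if li.contains (i : Int) then acc ++ letter.toList else acc ++ [cs.getD i ' ']) [])

-- ===== PORT B =====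
-- chars = list(current); for idx in li: if 0 <= idx < len(current): chars[idx] = letter; join
def replace_in_current_alt (current : String) (li : List Int) (letter : String) : String :=
  let cs := current.toList
  let cells := cs.map (fun c => [c])
  let cells := li.foldl
    (fun cells idx => if 0 ≤ idx ∧ idx < (cs.length : Int) then cells.set idx.toNat letter.toList else cells) cells
  String.ofList cells.flatten

-- ===== PRECONDITION & SPEC =====
def Spec_replace_in_current (current : String) (li : List Int) (letter : String) (out : String) : Prop := out = replace_in_current_alt current li letter
instance (current : String) (li : List Int) (letter : String) (out : String) : Decidable (Spec_replace_in_current current li letter out) := by unfold Spec_replace_in_current; infer_instance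

-- ===== CLAIM (what is proved, stated in full; the proofs are below) =====
def Claim_equal_replace_in_current : Prop := ∀ (current : String) (li : List Int) (letter : String), Dom_replace_in_current current li letter → Spec_replace_in_current current li letter (replace_in_current current li letter)

-- ===== LEMMAS AND PROOFS =====

-- A's accumulator fold is the flattening of the per-position pieces.
theorem foldl_append_flatten {α β : Type} (g : α → List β) :
    ∀ (l : List α) (acc : List β), l.foldl (fun acc i => acc ++ g i) acc = acc ++ (l.map g).flatten := by
  intro l
  induction l with
  | nil => simp
  | cons x xs ih => intro acc; simp [List.foldl_cons, ih]

-- B's write loop, characterised cell by cell.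
theorem foldset_get (n : Nat) (letter : List Char) :
    ∀ (li : List Int) (cells : List (List Char)), cells.length = n → ∀ (j : Nat),
      (li.foldl (fun cells idx =>
          if 0 ≤ idx ∧ idx < (n : Int) then cells.set idx.toNat letter else cells) cells)[j]? =
        if (j : Int) ∈ li ∧ j < n then some letter else cells[j]? := by
  intro li
  induction li with
  | nil => intro cells h j; simp
  | cons idx rest ih =>
    intro cells h j
    simp only [List.foldl_cons]
    by_cases hg : 0 ≤ idx ∧ idx < (n : Int)
    · rw [if_pos hg, ih _ (by simp [h]) j]
      by_cases hj : (j : Int) ∈ rest ∧ j < n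
      · rw [if_pos hj, if_pos ⟨List.mem_cons_of_mem _ hj.1, hj.2⟩]
      · rw [if_neg hj]
        by_cases hji : (j : Int) = idx
        · have hjn : j < n := by omega
          have hje : j = idx.toNat := by omega
          rw [if_pos ⟨by simp [hji], hjn⟩, hje, List.getElem?_set_self (by omega)]
        · rw [List.getElem?_set_ne (by omega), if_neg ?_]
          rintro ⟨hm, hn⟩
          rcases List.mem_cons.1 hm with h1 | h2
          · exact hji h1
          · exact hj ⟨h2, hn⟩
    · rw [if_neg hg, ih _ h j]
      by_cases hj : (j : Int) ∈ rest ∧ j < n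
      · rw [if_pos hj, if_pos ⟨List.mem_cons_of_mem _ hj.1, hj.2⟩]
      · rw [if_neg hj, if_neg ?_]
        rintro ⟨hm, hn⟩
        rcases List.mem_cons.1 hm with h1 | h2
        · exact absurd (⟨by omega, by omega⟩ : 0 ≤ idx ∧ idx < (n : Int)) hg
        · exact hj ⟨h2, hn⟩

-- ===== VERDICT (by name: the statement is the Claim_ definition above) =====
theorem replace_in_current_spec : Claim_equal_replace_in_current := by
  intro current li letter _
  unfold Spec_replace_in_current replace_in_current replace_in_current_alt
  set cs := current.toList with hcs
  set g : Nat → List Char :=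
    fun i => if li.contains (i : Int) then letter.toList else [cs.getD i ' '] with hg
  have hA : (List.range cs.length).foldl
      (fun acc (i : Nat) => if li.contains (i : Int) then acc ++ letter.toList else acc ++ [cs.getD i ' ']) []
      = ((List.range cs.length).map g).flatten := by
    rw [show (fun (acc : List Char) (i : Nat) => if li.contains (i : Int) then acc ++ letter.toList else acc ++ [cs.getD i ' ']) = fun acc i => acc ++ g i by
          funext acc i; simp only [hg]; split <;> rfl]
    exact (foldl_append_flatten g (List.range cs.length) []).trans (by rw [List.nil_append])
  have hB : (li.foldl
      (fun cells idx => if 0 ≤ idx ∧ idx < (cs.length : Int) then cells.set idx.toNat letter.toList else cells)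
      (cs.map (fun c => [c])))
      = (List.range cs.length).map g := by
    apply List.ext_getElem?
    intro j
    rw [foldset_get cs.length letter.toList li _ (by simp) j]
    by_cases hj : j < cs.length
    · by_cases hm : (j : Int) ∈ li
      · rw [if_pos ⟨hm, hj⟩, List.getElem?_map, List.getElem?_range hj]
        simp only [hg, Option.map_some]
        rw [if_pos (List.contains_iff_mem.2 hm)]
      · rw [if_neg (by rintro ⟨h1, _⟩; exact hm h1)]
        rw [List.getElem?_map, List.getElem?_map, List.getElem?_range hj,
            List.getElem?_eq_getElem hj]
        simp only [hg, Option.map_some]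
        rw [if_neg (fun h => hm (List.contains_iff_mem.1 h))]
        simp [List.getD, List.getElem?_eq_getElem hj]
    · rw [if_neg (by rintro ⟨_, h2⟩; exact hj h2)]
      rw [List.getElem?_map, List.getElem?_map,
          List.getElem?_eq_none (by simpa using hj), List.getElem?_eq_none (by simpa using hj)]
      rfl
  simp only [hA, hB]
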